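-- pv_equiv track=rewrite | github.com/kayodeomotoye/Code_Snippets | scrabble.py | _get_permutations_draw
-- ===== SOURCE A (Python) =====
-- import itertools
--
-- def _get_permutations_draw(draw):
--     """Helper to get all permutations of a draw (list of letters), hint:
--        use itertools.permutations (order of letters matters)"""
--     draw_str = ''.join(draw)
--     ret_list= []
--     for num in range(len(draw_str)):
--         res = itertools.permutations(draw_str, r=num)
--         for i in res:
--             ret_list.append(i)
--     return ret_list
-- ===== SOURCE B (Python) =====
-- def _get_permutations_draw(draw):
--     """Same result as A, but built breadth-first: keep a 'level' of
--     (partial-permutation, remaining-letters) states and extend every state by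
--     each remaining position, one round per target length."""
--     s = ''.join(draw)
--     ret_list = []
--     level = [((), tuple(s))]          # (permutation so far, letters still unused)
--     for _ in range(len(s)):
--         for perm, _ in level:
--             ret_list.append(perm)
--         level = [(perm + (rem[i],), rem[:i] + rem[i + 1:])
--                  for perm, rem in level
--                  for i in range(len(rem))]
--     return ret_list
-- ===== Notes on version B (the rewrite author's own statement) =====
-- stated objective: alternative
-- what changed: Replaces the per-length calls to itertools.permutations by a single breadth-first pass: a level of (partial permutation, remaining letters) states is flushed to the output and extended by one letter per round, so each permutation is built by extending a shorter one instead of being re-enumerated from index tuples.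
import Mathlib
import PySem

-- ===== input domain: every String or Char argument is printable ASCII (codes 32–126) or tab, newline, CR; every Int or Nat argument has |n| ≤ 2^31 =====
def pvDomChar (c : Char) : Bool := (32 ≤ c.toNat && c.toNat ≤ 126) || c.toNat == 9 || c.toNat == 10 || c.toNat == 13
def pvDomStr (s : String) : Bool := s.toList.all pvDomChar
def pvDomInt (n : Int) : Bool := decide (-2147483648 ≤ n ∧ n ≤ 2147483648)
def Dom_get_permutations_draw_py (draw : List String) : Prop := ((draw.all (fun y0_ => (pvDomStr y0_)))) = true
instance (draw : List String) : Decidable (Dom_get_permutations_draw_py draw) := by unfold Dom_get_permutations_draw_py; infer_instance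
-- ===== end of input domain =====

-- B replaces the per-length itertools.permutations enumeration by one breadth-first pass of
-- (partial permutation, remaining letters) states, each round extending every state by one letter.

-- ===== PORT A =====
-- itertools.permutations(pool, r) per its documented semantics: all length-r index
-- sequences over range(n) in lexicographic (product) order, keeping those with
-- pairwise-distinct indices, each mapped to pool's elements.
def pvProdSeqs (l : List Nat) : Nat → List (List Nat)
  | 0 => [[]]
  | r + 1 => l.flatMap (fun i => (pvProdSeqs l r).map (fun s => i :: s))

def pvPermsA (l : List Nat) (r : Nat) : List (List Nat) :=
  (pvProdSeqs l r).filter (fun s => decide s.Nodup)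

def get_permutations_draw_py (draw : List String) : List (List String) :=
  let pool : List Char := (draw.map String.toList).flatten   -- ''.join(draw)
  let n := pool.length
  (List.range n).foldl
    (fun ret_list num =>
      ret_list ++ (pvPermsA (List.range n) num).map
        (fun idxs => idxs.map (fun i => String.singleton (pool.getD i ' '))))
    []

-- ===== PORT B =====
-- one round of the breadth-first extension: every (perm, rem) state spawns one child
-- per position of rem (perm + (rem[i],), rem[:i] + rem[i+1:])
def pvStep (level : List (List String × List Char)) : List (List String × List Char) :=
  level.flatMap (fun pr =>
    (List.range pr.2.length).map (fun i =>
      (pr.1 ++ [String.singleton (pr.2.getD i ' ')], pr.2.take i ++ pr.2.drop (i + 1))))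

def get_permutations_draw_py_alt (draw : List String) : List (List String) :=
  let pool : List Char := (draw.map String.toList).flatten   -- ''.join(draw)
  ((List.range pool.length).foldl
    (fun st _ => (st.1 ++ st.2.map Prod.fst, pvStep st.2))
    ([], [(([] : List String), pool)])).1

-- ===== PRECONDITION & SPEC =====
def Spec_get_permutations_draw_py (draw : List String) (out : List (List String)) : Prop := out = get_permutations_draw_py_alt draw
instance (draw : List String) (out : List (List String)) : Decidable (Spec_get_permutations_draw_py draw out) := by unfold Spec_get_permutations_draw_py; infer_instance

-- ===== CLAIM (what is proved, stated in full; the proofs are below) =====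
def Claim_equal_get_permutations_draw_py : Prop := ∀ (draw : List String), Dom_get_permutations_draw_py draw → Spec_get_permutations_draw_py draw (get_permutations_draw_py draw)

-- ===== LEMMAS AND PROOFS =====

-- index-level breadth-first step and levels: extend every index list by each unused index
def pvIdxStep (l : List Nat) (L : List (List Nat)) : List (List Nat) :=
  L.flatMap (fun s => (l.filter (fun i => decide (i ∉ s))).map (fun i => s ++ [i]))

def pvLevels (l : List Nat) : Nat → List (List Nat)
  | 0 => [[]]
  | r + 1 => pvIdxStep l (pvLevels l r)

theorem pvFlatMap_filter {α β : Type} (l : List α) (p : α → Bool) (g : α → List β) :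
    (l.filter p).flatMap g = l.flatMap (fun i => if p i then g i else []) := by
  induction l with
  | nil => rfl
  | cons a l ih => by_cases h : p a <;> simp [h, ih]

theorem pvNodupSnocP (s : List Nat) (i : Nat) :
    (s ++ [i]).Nodup ↔ s.Nodup ∧ i ∉ s := by
  induction s with
  | nil => simp
  | cons a s ih =>
    simp only [List.cons_append, List.nodup_cons, List.mem_append,
      List.mem_cons, ih, not_or, eq_comm]
    tauto

theorem pvNodupSnoc (s : List Nat) (i : Nat) :
    (decide (s ++ [i]).Nodup) = (decide s.Nodup && decide (i ∉ s)) := by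
  by_cases h1 : s.Nodup <;> by_cases h2 : i ∈ s <;>
    simp [pvNodupSnocP, h1, h2]

-- the product sequences of length r+1 are, in order, those of length r each extended by every letter
theorem pvProdSeqs_snoc (l : List Nat) (r : Nat) :
    pvProdSeqs l (r + 1) = (pvProdSeqs l r).flatMap (fun s => l.map (fun i => s ++ [i])) := by
  induction r with
  | zero =>
    simp only [pvProdSeqs]
    induction l with
    | nil => rfl
    | cons a l ih => simp_all
  | succ r ih =>
    have hunf : pvProdSeqs l (r + 2) = l.flatMap (fun i => (pvProdSeqs l (r + 1)).map (fun s => i :: s)) := rfl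
    have hunf2 : pvProdSeqs l (r + 1) = l.flatMap (fun i => (pvProdSeqs l r).map (fun s => i :: s)) := rfl
    conv_lhs => rw [hunf, ih]
    conv_rhs => rw [hunf2]
    simp [List.map_flatMap, List.flatMap_map, List.flatMap_assoc, List.map_map,
      Function.comp_def, List.cons_append]

-- the lexicographic distinct-index tuples of each length = the breadth-first index levels
theorem pvPermsA_eq_levels (l : List Nat) (r : Nat) : pvPermsA l r = pvLevels l r := by
  induction r with
  | zero => simp [pvPermsA, pvProdSeqs, pvLevels]
  | succ r ih =>
    show (pvProdSeqs l (r + 1)).filter _ = pvIdxStep l (pvLevels l r)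
    rw [pvProdSeqs_snoc, List.filter_flatMap, pvIdxStep, ← ih, pvPermsA, pvFlatMap_filter]
    congr 1
    funext s
    rw [List.filter_map]
    by_cases hs : s.Nodup
    · rw [if_pos (by simpa using hs)]
      congr 1
      refine List.filter_congr (fun i _ => ?_)
      simp [Function.comp, pvNodupSnoc, hs]
    · rw [if_neg (by simpa using hs)]
      rw [List.map_eq_nil_iff, List.filter_eq_nil_iff]
      intro i _
      simp [Function.comp, pvNodupSnoc, hs]

-- positional "pick one, keep the rest" on a list
def pvPicks {α : Type} : List α → List (α × List α)
  | [] => []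
  | a :: l => (a, l) :: (pvPicks l).map (fun pr => (pr.1, a :: pr.2))

theorem pvPicks_range {α : Type} (d : α) (l : List α) :
    (List.range l.length).map (fun i => (l.getD i d, l.take i ++ l.drop (i + 1))) = pvPicks l := by
  induction l with
  | nil => rfl
  | cons a l ih =>
    show (List.range (l.length + 1)).map _ = _
    rw [List.range_succ_eq_map, List.map_cons, List.map_map]
    refine congrArg₂ List.cons rfl ?_
    rw [← ih, List.map_map]
    rfl

theorem pvPicks_map {α β : Type} (f : α → β) (l : List α) :
    pvPicks (l.map f) = (pvPicks l).map (fun pr => (f pr.1, pr.2.map f)) := by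
  induction l with
  | nil => rfl
  | cons a l ih => simp [pvPicks, ih, List.map_map, Function.comp_def]

theorem pvPicks_nodup (u : List Nat) (hu : u.Nodup) :
    pvPicks u = u.map (fun j => (j, u.filter (fun x => decide (x ≠ j)))) := by
  induction u with
  | nil => rfl
  | cons a u ih =>
    obtain ⟨ha, hu'⟩ := List.nodup_cons.mp hu
    simp only [pvPicks, ih hu', List.map_cons, List.map_map]
    refine congrArg₂ List.cons ?_ ?_
    · simp only [List.filter_cons]
      rw [if_neg (by simp), List.filter_eq_self.mpr (fun x hx => by
        simp only [decide_eq_true_eq]; exact fun he => ha (he ▸ hx))]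
    · refine List.map_congr_left (fun j hj => ?_)
      have hja : a ≠ j := fun he => ha (he ▸ hj)
      simp [hja]

-- the abstraction map from index lists to B's (perm, remaining) states
def pvOutIdx (pool : List Char) (s : List Nat) : List String :=
  s.map (fun i => String.singleton (pool.getD i ' '))

def pvPsi (pool : List Char) (s : List Nat) : List String × List Char :=
  (pvOutIdx pool s,
   ((List.range pool.length).filter (fun i => decide (i ∉ s))).map (fun i => pool.getD i ' '))

-- picking position i of the remaining list of an abstracted state = appending the i-th unused index
theorem pvStepOne (pool : List Char) (s : List Nat) :
    (List.range (pvPsi pool s).2.length).map (fun i =>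
      ((pvPsi pool s).1 ++ [String.singleton ((pvPsi pool s).2.getD i ' ')],
        (pvPsi pool s).2.take i ++ (pvPsi pool s).2.drop (i + 1)))
    = ((List.range pool.length).filter (fun i => decide (i ∉ s))).map
        (fun j => pvPsi pool (s ++ [j])) := by
  have hu : ((List.range pool.length).filter (fun i => decide (i ∉ s))).Nodup :=
    List.Nodup.filter _ (List.nodup_range)
  set u := (List.range pool.length).filter (fun i => decide (i ∉ s)) with hudef
  have h2 : (pvPsi pool s).2 = u.map (fun i => pool.getD i ' ') := rfl
  rw [h2]
  rw [show (fun i =>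
        ((pvPsi pool s).1 ++ [String.singleton ((u.map (fun i => pool.getD i ' ')).getD i ' ')],
          (u.map (fun i => pool.getD i ' ')).take i ++ (u.map (fun i => pool.getD i ' ')).drop (i + 1)))
      = ((fun pr : Char × List Char => ((pvPsi pool s).1 ++ [String.singleton pr.1], pr.2)) ∘
          (fun i => ((u.map (fun i => pool.getD i ' ')).getD i ' ',
            (u.map (fun i => pool.getD i ' ')).take i ++ (u.map (fun i => pool.getD i ' ')).drop (i + 1))))
      from rfl]
  rw [← List.map_map, pvPicks_range, pvPicks_map, pvPicks_nodup u hu, List.map_map, List.map_map]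
  refine List.map_congr_left (fun j hj => ?_)
  have hjs : j ∉ s := by
    have := List.of_mem_filter (hudef ▸ hj)
    simpa using this
  refine Prod.ext ?_ ?_
  · show (pvPsi pool s).1 ++ [String.singleton (pool.getD j ' ')] = (pvPsi pool (s ++ [j])).1
    simp [pvPsi, pvOutIdx]
  · show (u.filter (fun x => decide (x ≠ j))).map (fun i => pool.getD i ' ') = (pvPsi pool (s ++ [j])).2
    simp only [pvPsi, hudef, List.filter_filter]
    congr 1
    refine List.filter_congr (fun i _ => ?_)
    by_cases h1 : i ∈ s <;> by_cases hij : i = j <;> simp [List.mem_append, h1, hij]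

-- one B round on an abstracted level = abstraction of one index round
theorem pvStep_psi (pool : List Char) (L : List (List Nat)) :
    pvStep (L.map (pvPsi pool)) = (pvIdxStep (List.range pool.length) L).map (pvPsi pool) := by
  unfold pvStep pvIdxStep
  rw [List.flatMap_map, List.map_flatMap]
  congr 1
  funext s
  rw [List.map_map]
  simpa [Function.comp_def] using pvStepOne pool s

-- flushed output of m breadth-first rounds, on B's states and on index lists
def pvLevOut : Nat → List (List String × List Char) → List (List String)
  | 0, _ => []
  | m + 1, lvl => lvl.map Prod.fst ++ pvLevOut m (pvStep lvl)

def pvIdxOut (pool : List Char) : Nat → List (List Nat) → List (List String)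
  | 0, _ => []
  | m + 1, L => L.map (pvOutIdx pool) ++ pvIdxOut pool m (pvIdxStep (List.range pool.length) L)

theorem pvFoldlB (l : List Nat) : ∀ (acc : List (List String)) (lvl : List (List String × List Char)),
    (l.foldl (fun st _ => (st.1 ++ st.2.map Prod.fst, pvStep st.2)) (acc, lvl)).1
      = acc ++ pvLevOut l.length lvl := by
  induction l with
  | nil => intro acc lvl; simp [pvLevOut]
  | cons a l ih =>
    intro acc lvl
    show (l.foldl _ (acc ++ lvl.map Prod.fst, pvStep lvl)).1 = _
    rw [ih, List.length_cons, pvLevOut, List.append_assoc]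

theorem pvLevOut_psi (pool : List Char) : ∀ (m : Nat) (L : List (List Nat)),
    pvLevOut m (L.map (pvPsi pool)) = pvIdxOut pool m L := by
  intro m
  induction m with
  | zero => intro L; rfl
  | succ m ih =>
    intro L
    show (L.map (pvPsi pool)).map Prod.fst ++ pvLevOut m (pvStep (L.map (pvPsi pool))) = _
    rw [pvStep_psi, ih, List.map_map]
    rfl

theorem pvIdxOut_levels (pool : List Char) : ∀ (m j : Nat),
    pvIdxOut pool m (pvLevels (List.range pool.length) j)
      = (List.range' j m).flatMap
          (fun num => (pvLevels (List.range pool.length) num).map (pvOutIdx pool)) := by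
  intro m
  induction m with
  | zero => intro j; rfl
  | succ m ih =>
    intro j
    show (pvLevels (List.range pool.length) j).map (pvOutIdx pool)
        ++ pvIdxOut pool m (pvIdxStep (List.range pool.length) (pvLevels (List.range pool.length) j)) = _
    rw [show pvIdxStep (List.range pool.length) (pvLevels (List.range pool.length) j)
          = pvLevels (List.range pool.length) (j + 1) from rfl, ih, List.range'_succ]
    simp

theorem pvFoldl_append {α β : Type} (l : List α) (F : α → List β) :
    ∀ acc, l.foldl (fun r x => r ++ F x) acc = acc ++ l.flatMap F := by
  induction l with
  | nil => intro acc; simp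
  | cons a l ih => intro acc; simp [ih]

theorem pvPsi_nil (pool : List Char) : pvPsi pool [] = (([] : List String), pool) := by
  unfold pvPsi pvOutIdx
  refine Prod.ext rfl ?_
  show ((List.range pool.length).filter _).map _ = pool
  rw [List.filter_eq_self.mpr (fun x _ => by simp)]
  induction pool with
  | nil => rfl
  | cons a pool ih =>
    show (List.range (pool.length + 1)).map _ = _
    rw [List.range_succ_eq_map, List.map_cons, List.map_map]
    exact congrArg₂ List.cons rfl ih

-- ===== VERDICT (by name: the statement is the Claim_ definition above) =====
theorem get_permutations_draw_py_spec : Claim_equal_get_permutations_draw_py := by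
  intro draw _
  unfold Spec_get_permutations_draw_py get_permutations_draw_py get_permutations_draw_py_alt
  set pool : List Char := (draw.map String.toList).flatten with hpool
  show (List.range pool.length).foldl _ [] = _
  rw [pvFoldl_append, pvFoldlB, List.length_range, List.nil_append, List.nil_append]
  rw [show [(([] : List String), pool)] = ([([] : List Nat)]).map (pvPsi pool) from by
        simp [pvPsi_nil]]
  rw [pvLevOut_psi, show ([([] : List Nat)]) = pvLevels (List.range pool.length) 0 from rfl,
    pvIdxOut_levels, List.range_eq_range']
  congr 1
  funext num
  rw [pvPermsA_eq_levels]
  rfl
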